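-- pv_equiv track=rewrite | github.com/naturallanguagepuzzling/blog | 2020-12-20-Christmas_wishes.py | find_pairs_sum_ten
-- ===== SOURCE A (Python) =====
-- def find_pairs_sum_ten(good_words):
--     sum_ten = []
--     while good_words:
--         gwa = good_words.pop(0)
--         for gwb in good_words:
--             if len(gwa)+len(gwb) == 10:
--                 sum_ten.append([gwa, gwb])
--             else:
--                 pass
--     return(sum_ten)
-- ===== SOURCE B (Python) =====
-- def find_pairs_sum_ten(good_words):
--     # One right-to-left pass with length buckets instead of nested scans.
--     # (Unlike A, this does not mutate/empty the caller's list.)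
--     buckets = {}
--     blocks = []
--     for w in reversed(good_words):
--         need = 10 - len(w)
--         blocks.append([[w, x] for x in reversed(buckets.get(need, []))])
--         buckets.setdefault(len(w), []).append(w)
--     out = []
--     for b in reversed(blocks):
--         out.extend(b)
--     return out
-- ===== Notes on version B (the rewrite author's own statement) =====
-- stated objective: faster
-- what changed: Replaced the nested pop/scan over all pairs by a single right-to-left pass that buckets words by length in a dict and emits, for each word, the later words of complementary length directly from the bucket.
import Mathlib
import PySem

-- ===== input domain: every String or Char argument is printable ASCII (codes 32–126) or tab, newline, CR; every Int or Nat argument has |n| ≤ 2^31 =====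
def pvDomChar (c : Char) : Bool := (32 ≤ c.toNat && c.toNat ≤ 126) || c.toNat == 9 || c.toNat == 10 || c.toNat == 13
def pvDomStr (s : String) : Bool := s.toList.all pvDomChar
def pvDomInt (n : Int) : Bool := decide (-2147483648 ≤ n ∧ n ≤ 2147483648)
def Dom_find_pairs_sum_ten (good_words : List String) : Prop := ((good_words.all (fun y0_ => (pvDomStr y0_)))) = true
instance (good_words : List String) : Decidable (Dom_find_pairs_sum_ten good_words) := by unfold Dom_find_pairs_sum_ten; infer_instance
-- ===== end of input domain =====

-- B replaces A's nested pop/scan over all pairs by one right-to-left pass with length buckets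
-- (faster; equivalence is about the RETURN value only: Python A empties its argument list, B does not mutate it).

-- ===== PORT A =====
-- 'while good_words: gwa = good_words.pop(0); for gwb in good_words: …' — structural recursion on the list,
-- inner for-loop as a foldl over the remaining words appending matching pairs.
def pvGoA : List String → List (List String) → List (List String)
  | [], sum_ten => sum_ten
  | gwa :: rest, sum_ten =>
      pvGoA rest
        (rest.foldl
          (fun s gwb =>
            if PySem.Str.len gwa + PySem.Str.len gwb = 10 then s ++ [[gwa, gwb]] else s)
          sum_ten)

def find_pairs_sum_ten (good_words : List String) : List (List String) :=
  pvGoA good_words []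

-- ===== PORT B =====
-- one step of B's right-to-left pass: emit the block for w from the bucket of complementary length,
-- then append w to its own length bucket (buckets hold later words in reverse order, as in Source B).
def pvStepB (st : PySem.Dict Int (List String) × List (List (List String))) (w : String) :
    PySem.Dict Int (List String) × List (List (List String)) :=
  let need : Int := 10 - PySem.Str.len w
  let block := ((st.1.getD need []).reverse).map (fun x => [w, x])
  (st.1.insert (PySem.Str.len w) (st.1.getD (PySem.Str.len w) [] ++ [w]), st.2 ++ [block])

def find_pairs_sum_ten_alt (good_words : List String) : List (List String) :=
  let st := good_words.reverse.foldl pvStepB (PySem.Dict.empty, [])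
  st.2.reverse.foldl (fun out b => out ++ b) []

-- ===== PRECONDITION & SPEC =====
def Spec_find_pairs_sum_ten (good_words : List String) (out : List (List String)) : Prop := out = find_pairs_sum_ten_alt good_words
instance (good_words : List String) (out : List (List String)) : Decidable (Spec_find_pairs_sum_ten good_words out) := by unfold Spec_find_pairs_sum_ten; infer_instance

-- ===== CLAIM (what is proved, stated in full; the proofs are below) =====
def Claim_equal_find_pairs_sum_ten : Prop := ∀ (good_words : List String), Dom_find_pairs_sum_ten good_words → Spec_find_pairs_sum_ten good_words (find_pairs_sum_ten good_words)

-- ===== LEMMAS AND PROOFS =====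

-- canonical form shared by both proofs
def pvF : List String → List (List String)
  | [] => []
  | a :: r =>
      (r.filter (fun b => PySem.Str.len a + PySem.Str.len b = 10)).map (fun b => [a, b]) ++ pvF r

theorem pvGoA_eq (l : List String) (acc : List (List String)) :
    pvGoA l acc = acc ++ pvF l := by
  induction l generalizing acc with
  | nil => simp [pvGoA, pvF]
  | cons a r ih =>
      simp only [pvGoA, pvF, ih]
      rw [PySem.List.foldl_append_ite (fun b => PySem.Str.len a + PySem.Str.len b = 10)
        (fun b => [a, b])]
      simp [List.append_assoc]

theorem pvA_eq (l : List String) : find_pairs_sum_ten l = pvF l := by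
  simp [find_pairs_sum_ten, pvGoA_eq]

-- invariant of B's right-to-left pass
theorem pvStB_inv (l : List String) :
    (∀ k : Int,
        (l.reverse.foldl pvStepB (PySem.Dict.empty, [])).1.getD k []
          = (l.filter (fun b => PySem.Str.len b = k)).reverse)
      ∧ (l.reverse.foldl pvStepB (PySem.Dict.empty, [])).2.reverse.flatten = pvF l := by
  induction l with
  | nil => simp [pvF]
  | cons a r ih =>
      obtain ⟨hd, hb⟩ := ih
      have hstep : (a :: r).reverse.foldl pvStepB (PySem.Dict.empty, [])
          = pvStepB (r.reverse.foldl pvStepB (PySem.Dict.empty, [])) a := by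
        simp [List.foldl_append]
      have hfc : ∀ b ∈ r,
          (decide (PySem.Str.len b = 10 - PySem.Str.len a))
            = (decide (PySem.Str.len a + PySem.Str.len b = 10)) := by
        intro b _
        simp only [decide_eq_decide]
        omega
      constructor
      · intro k
        rw [hstep]
        simp only [pvStepB, PySem.Dict.getD_insert]
        by_cases hk : k = PySem.Str.len a
        · subst hk
          rw [if_pos rfl, hd, List.filter_cons_of_pos (by simp), List.reverse_cons]
        · rw [if_neg hk, hd,
            List.filter_cons_of_neg
              (by simp only [decide_eq_true_eq]; exact fun hc => hk hc.symm)]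
      · rw [hstep]
        simp only [pvStepB, List.reverse_append, List.reverse_cons, List.reverse_nil,
          List.nil_append, List.cons_append, List.flatten_cons, hb, hd, List.reverse_reverse]
        rw [List.filter_congr hfc]
        simp [pvF]

theorem pvB_eq (l : List String) : find_pairs_sum_ten_alt l = pvF l := by
  have h := (pvStB_inv l).2
  simp only [find_pairs_sum_ten_alt]
  rw [PySem.List.foldl_append_eq_flatten]
  simpa using h

-- ===== VERDICT (by name: the statement is the Claim_ definition above) =====
theorem find_pairs_sum_ten_spec : Claim_equal_find_pairs_sum_ten := by
  intro l _
  unfold Spec_find_pairs_sum_ten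
  rw [pvA_eq, pvB_eq]
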